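-- pv_equiv track=rewrite | github.com/paulohenriquevn/lovedcrm | api/services/crm_lead_analytics_service.py | _identify_timing_bottleneck
-- ===== SOURCE A (Python) =====
-- from typing import Any, Dict, List, Optional
--
-- def _identify_timing_bottleneck(timing_analysis: Dict) -> Optional[str]:
--     """Identify the stage that takes the longest time on average."""
--     if not timing_analysis:
--         return None
--
--     max_days = 0
--     bottleneck_stage = None
--
--     for stage, data in timing_analysis.items():
--         avg_days = data.get("avg_days", 0)
--         if avg_days > max_days and avg_days > 7:  # Only flag if > 7 days
--             max_days = avg_days
--             bottleneck_stage = stage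
--
--     return bottleneck_stage
-- ===== SOURCE B (Python) =====
-- from typing import Any, Dict, List, Optional
--
-- def _identify_timing_bottleneck(timing_analysis: Dict) -> Optional[str]:
--     """Identify the stage that takes the longest time on average."""
--     ranked = sorted(timing_analysis.items(),
--                     key=lambda kv: kv[1].get("avg_days", 0),
--                     reverse=True)
--     if not ranked:
--         return None
--     stage, data = ranked[0]
--     return stage if data.get("avg_days", 0) > 7 else None
-- ===== Notes on version B (the rewrite author's own statement) =====
-- stated objective: alternative
-- what changed: Replaces the one-pass loop with two threshold-coupled accumulators (running max and best stage) by a stable descending sort of all stages by avg_days followed by a single head inspection against the 7-day threshold; sort stability reproduces A's first-on-tie choice.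
import Mathlib
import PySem

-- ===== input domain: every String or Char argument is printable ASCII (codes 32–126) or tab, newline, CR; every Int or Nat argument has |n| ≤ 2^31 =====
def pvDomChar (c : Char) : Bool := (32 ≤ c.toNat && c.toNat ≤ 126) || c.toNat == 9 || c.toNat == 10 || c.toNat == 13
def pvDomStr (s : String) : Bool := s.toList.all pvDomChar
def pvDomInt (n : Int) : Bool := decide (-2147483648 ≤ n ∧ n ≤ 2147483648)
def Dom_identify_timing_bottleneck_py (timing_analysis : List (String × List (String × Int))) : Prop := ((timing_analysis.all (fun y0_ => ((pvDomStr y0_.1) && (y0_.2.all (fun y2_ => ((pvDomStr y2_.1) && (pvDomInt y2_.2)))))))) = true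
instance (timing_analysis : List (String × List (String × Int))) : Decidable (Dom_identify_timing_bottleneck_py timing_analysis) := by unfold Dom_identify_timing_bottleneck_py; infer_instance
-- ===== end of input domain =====

-- B replaces A's one-pass loop with two accumulators by a stable descending sort by
-- avg_days followed by a single head inspection against the 7-day threshold (objective: alternative).


-- ===== PORT A =====
-- the for-loop over timing_analysis.items() carrying max_days and bottleneck_stage
def pvGoA : List (String × List (String × Int)) → Int → Option String → Option String
  | [], _, best => best
  | (stage, data) :: rest, maxDays, best =>
    let avgDays := PySem.Dict.getD (PySem.Dict.mk data) "avg_days" 0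
    if avgDays > maxDays ∧ avgDays > 7 then pvGoA rest avgDays (some stage)
    else pvGoA rest maxDays best

def identify_timing_bottleneck_py (timing_analysis : List (String × List (String × Int))) : Option String :=
  if timing_analysis = [] then none
  else pvGoA timing_analysis 0 none

-- ===== PORT B =====
-- the sort key: kv[1].get("avg_days", 0)
def pvKey (sd : String × List (String × Int)) : Int :=
  PySem.Dict.getD (PySem.Dict.mk sd.2) "avg_days" 0

def identify_timing_bottleneck_py_alt (timing_analysis : List (String × List (String × Int))) : Option String :=
  match PySem.List.sorted timing_analysis pvKey true with
  | [] => none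
  | (stage, data) :: _ =>
    if PySem.Dict.getD (PySem.Dict.mk data) "avg_days" 0 > 7 then some stage else none

-- ===== PRECONDITION & SPEC =====
def Spec_identify_timing_bottleneck_py (timing_analysis : List (String × List (String × Int))) (out : Option String) : Prop := out = identify_timing_bottleneck_py_alt timing_analysis
instance (timing_analysis : List (String × List (String × Int))) (out : Option String) : Decidable (Spec_identify_timing_bottleneck_py timing_analysis out) := by unfold Spec_identify_timing_bottleneck_py; infer_instance

-- ===== CLAIM (what is proved, stated in full; the proofs are below) =====
def Claim_equal_identify_timing_bottleneck_py : Prop := ∀ (timing_analysis : List (String × List (String × Int))), Dom_identify_timing_bottleneck_py timing_analysis → Spec_identify_timing_bottleneck_py timing_analysis (identify_timing_bottleneck_py timing_analysis)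

-- ===== LEMMAS AND PROOFS =====
-- running first-max step (what max?/the head of the stable reverse sort computes)
def pvMStep (acc : Option (String × List (String × Int))) (x : String × List (String × Int)) :
    Option (String × List (String × Int)) :=
  match acc with
  | none => some x
  | some m => if pvKey m < pvKey x then some x else some m

-- read the answer off the running maximum
def pvOut (o : Option (String × List (String × Int))) : Option String :=
  match o with
  | none => none
  | some m => if pvKey m > 7 then some m.1 else none

-- value A's max_days accumulator holds when A's best-so-far is p
def pvStVal : Option (String × Int) → Int
  | none => 0
  | some (_, a) => a

theorem pvHead_insertBy (x : String × List (String × Int)) (acc : List (String × List (String × Int))) :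
    (PySem.List.insertBy (fun a b => decide (pvKey b < pvKey a)) x acc).head? = pvMStep acc.head? x := by
  cases acc with
  | nil => simp [PySem.List.insertBy, pvMStep]
  | cons y ys =>
    simp only [PySem.List.insertBy, pvMStep, List.head?]
    split_ifs with h <;> simp_all

theorem pvHead_foldl (l : List (String × List (String × Int))) :
    ∀ acc : List (String × List (String × Int)),
      (List.foldl (fun acc x => PySem.List.insertBy (fun a b => decide (pvKey b < pvKey a)) x acc) acc l).head?
        = List.foldl pvMStep acc.head? l := by
  induction l with
  | nil => intro acc; rfl
  | cons hd tl ih =>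
    intro acc
    simp only [List.foldl_cons]
    rw [ih, pvHead_insertBy]

theorem pvSorted_head (ta : List (String × List (String × Int))) :
    (PySem.List.sorted ta pvKey true).head? = List.foldl pvMStep none ta := by
  rw [PySem.List.sorted_rev_eq_foldl_insertBy]
  simpa using pvHead_foldl ta []

theorem pvGoA_inv (l : List (String × List (String × Int))) :
    ∀ (pA : Option (String × Int)) (pB : Option (String × List (String × Int))),
      ((pA = none ∧ pB = none) ∨
        ∃ s d, pB = some (s, d) ∧
          ((7 < pvKey (s, d) ∧ pA = some (s, pvKey (s, d))) ∨ (pvKey (s, d) ≤ 7 ∧ pA = none))) →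
      pvGoA l (pvStVal pA) (pA.map Prod.fst) = pvOut (List.foldl pvMStep pB l) := by
  induction l with
  | nil =>
    rintro pA pB (⟨hA, hB⟩ | ⟨s, d, hB, ⟨h7, hA⟩ | ⟨h7, hA⟩⟩) <;>
      subst hA <;> subst hB <;> simp [pvGoA, pvOut] <;> omega
  | cons hd tl ih =>
    obtain ⟨stage, data⟩ := hd
    rintro pA pB (⟨hA, hB⟩ | ⟨s, d, hB, ⟨h7, hA⟩ | ⟨h7, hA⟩⟩) <;> subst hA <;> subst hB <;>
      simp only [pvGoA, pvStVal, Option.map_none, Option.map_some, List.foldl_cons, pvMStep]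
    · -- both states empty
      by_cases ha : PySem.Dict.getD (PySem.Dict.mk data) "avg_days" 0 > 7
      · rw [if_pos ⟨by omega, ha⟩]
        have := ih (some (stage, pvKey (stage, data))) (some (stage, data))
          (Or.inr ⟨stage, data, rfl, Or.inl ⟨ha, rfl⟩⟩)
        simpa [pvStVal, pvKey] using this
      · rw [if_neg (by simp at ha ⊢; omega)]
        exact ih none (some (stage, data)) (Or.inr ⟨stage, data, rfl, Or.inr ⟨by simpa [pvKey] using ha, rfl⟩⟩)
    · -- best so far (s, d) with pvKey (s,d) > 7
      simp only [pvKey] at h7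
      by_cases hgt : PySem.Dict.getD (PySem.Dict.mk d) "avg_days" 0
          < PySem.Dict.getD (PySem.Dict.mk data) "avg_days" 0
      · rw [if_pos ⟨hgt, by omega⟩, if_pos (show pvKey (s, d) < pvKey (stage, data) from hgt)]
        have := ih (some (stage, pvKey (stage, data))) (some (stage, data))
          (Or.inr ⟨stage, data, rfl, Or.inl ⟨by simp only [pvKey]; omega, rfl⟩⟩)
        simpa [pvStVal, pvKey] using this
      · rw [if_neg (by simp only [pvKey]; omega), if_neg (show ¬ pvKey (s, d) < pvKey (stage, data) from hgt)]
        exact ih (some (s, pvKey (s, d))) (some (s, d))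
          (Or.inr ⟨s, d, rfl, Or.inl ⟨by simpa [pvKey] using h7, rfl⟩⟩)
    · -- running max (s, d) below the threshold, A's state empty
      simp only [pvKey] at h7
      by_cases ha : PySem.Dict.getD (PySem.Dict.mk data) "avg_days" 0 > 7
      · have hlt : pvKey (s, d) < pvKey (stage, data) := by simp only [pvKey]; omega
        rw [if_pos ⟨by omega, ha⟩, if_pos hlt]
        have := ih (some (stage, pvKey (stage, data))) (some (stage, data))
          (Or.inr ⟨stage, data, rfl, Or.inl ⟨by simpa [pvKey] using ha, rfl⟩⟩)
        simpa [pvStVal, pvKey] using this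
      · rw [if_neg (by omega)]
        by_cases hlt : pvKey (s, d) < pvKey (stage, data)
        · rw [if_pos hlt]
          exact ih none (some (stage, data))
            (Or.inr ⟨stage, data, rfl, Or.inr ⟨by simp only [pvKey]; omega, rfl⟩⟩)
        · rw [if_neg hlt]
          exact ih none (some (s, d))
            (Or.inr ⟨s, d, rfl, Or.inr ⟨by simpa [pvKey] using h7, rfl⟩⟩)

-- ===== VERDICT (by name: the statement is the Claim_ definition above) =====
theorem identify_timing_bottleneck_py_spec : Claim_equal_identify_timing_bottleneck_py := by
  intro ta _
  unfold Spec_identify_timing_bottleneck_py identify_timing_bottleneck_py identify_timing_bottleneck_py_alt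
  have hmain : pvGoA ta 0 none = pvOut (List.foldl pvMStep none ta) := by
    simpa [pvStVal] using pvGoA_inv ta none none (Or.inl ⟨rfl, rfl⟩)
  by_cases he : ta = []
  · subst he; simp [PySem.List.sorted]
  · rw [if_neg he, hmain, ← pvSorted_head]
    cases hs : PySem.List.sorted ta pvKey true with
    | nil => simp [pvOut]
    | cons m t => obtain ⟨s, d⟩ := m; simp [pvOut, pvKey]
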